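-- pv_equiv track=rewrite | github.com/FAnzTvDev/ATLAS_CONTROL_SYSTEM | atlas_agents/script_fidelity_agent.py | check_prompt_contains_props
-- ===== SOURCE A (Python) =====
-- from typing import Dict, List, Optional, Tuple
--
-- def check_prompt_contains_props(prompt: str, props: List[str]) -> Tuple[List[str], List[str]]:
--     """Check which props are present/missing in a prompt."""
--     if not prompt:
--         return [], props
--     prompt_lower = prompt.lower()
--     found = []
--     missing = []
--     for prop in props:
--         if prop.lower() in prompt_lower:
--             found.append(prop)
--         else:
--             missing.append(prop)
--     return found, missing
-- ===== SOURCE B (Python) =====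
-- def check_prompt_contains_props(prompt, props):
--     """Check which props are present/missing in a prompt."""
--     if not prompt:
--         return [], props
--     prompt_lower = prompt.lower()
--     cache = {}
--     for prop in props:
--         lp = prop.lower()
--         if lp not in cache:
--             cache[lp] = lp in prompt_lower
--     found = [p for p in props if cache[p.lower()]]
--     missing = [p for p in props if not cache[p.lower()]]
--     return found, missing
-- ===== Notes on version B (the rewrite author's own statement) =====
-- stated objective: alternative
-- what changed: B replaces A's single append-to-two-accumulators loop by first building a containment cache keyed by each distinct lowered prop (so duplicate props are substring-searched only once) and then producing found/missing as two filters over the original list.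
import Mathlib
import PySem

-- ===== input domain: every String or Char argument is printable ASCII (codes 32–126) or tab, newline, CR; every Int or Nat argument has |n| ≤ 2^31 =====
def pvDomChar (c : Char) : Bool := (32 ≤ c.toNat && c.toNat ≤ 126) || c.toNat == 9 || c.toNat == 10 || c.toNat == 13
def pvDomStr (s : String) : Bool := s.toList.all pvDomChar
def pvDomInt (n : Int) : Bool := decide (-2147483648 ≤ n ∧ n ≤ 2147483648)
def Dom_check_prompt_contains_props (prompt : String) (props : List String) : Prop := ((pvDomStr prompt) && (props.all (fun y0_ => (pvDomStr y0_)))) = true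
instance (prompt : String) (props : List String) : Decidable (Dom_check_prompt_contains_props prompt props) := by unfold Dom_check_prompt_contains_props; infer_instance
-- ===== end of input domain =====

-- B caches the containment check per distinct lowered prop and categorizes via two filters; same results as A.

-- ===== PORT A =====
def check_prompt_contains_props (prompt : String) (props : List String) : List String × List String :=
  if prompt = "" then ([], props)
  else
    let prompt_lower := PySem.Str.lower prompt
    let fm := props.foldl (fun (acc : List String × List String) prop =>
      if PySem.Str.isIn (PySem.Str.lower prop) prompt_lower then
        (acc.1 ++ [prop], acc.2)
      else
        (acc.1, acc.2 ++ [prop])) ([], [])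
    (fm.1, fm.2)

-- ===== PORT B =====
def check_prompt_contains_props_alt (prompt : String) (props : List String) : List String × List String :=
  if prompt = "" then ([], props)
  else
    let prompt_lower := PySem.Str.lower prompt
    let cache := props.foldl (fun (d : PySem.Dict String Bool) prop =>
      let lp := PySem.Str.lower prop
      if d.contains lp then d else d.insert lp (PySem.Str.isIn lp prompt_lower)) PySem.Dict.empty
    (props.filter (fun p => cache.getD (PySem.Str.lower p) false),
     props.filter (fun p => !(cache.getD (PySem.Str.lower p) false)))

-- ===== PRECONDITION & SPEC =====
def Spec_check_prompt_contains_props (prompt : String) (props : List String) (out : List String × List String) : Prop := out = check_prompt_contains_props_alt prompt props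
instance (prompt : String) (props : List String) (out : List String × List String) : Decidable (Spec_check_prompt_contains_props prompt props out) := by unfold Spec_check_prompt_contains_props; infer_instance

-- ===== CLAIM (what is proved, stated in full; the proofs are below) =====
def Claim_equal_check_prompt_contains_props : Prop := ∀ (prompt : String) (props : List String), Dom_check_prompt_contains_props prompt props → Spec_check_prompt_contains_props prompt props (check_prompt_contains_props prompt props)

-- ===== LEMMAS AND PROOFS =====

-- A's loop with two append accumulators is the pair of filters.
theorem pvA_loop (c : String → Bool) (props : List String) (f m : List String) :
    props.foldl (fun (acc : List String × List String) prop =>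
      if c prop then (acc.1 ++ [prop], acc.2) else (acc.1, acc.2 ++ [prop])) (f, m)
      = (f ++ props.filter c, m ++ props.filter (fun p => !(c p))) := by
  induction props generalizing f m with
  | nil => simp
  | cons x xs ih =>
    by_cases h : c x = true <;> simp [List.foldl_cons, h, ih]

-- every value stored in B's cache is the containment bit of its key
theorem pvCache_val (pl : String) (props : List String) (d : PySem.Dict String Bool)
    (hd : ∀ k v, d.get? k = some v → v = PySem.Str.isIn k pl) :
    ∀ k v, (props.foldl (fun (d : PySem.Dict String Bool) prop =>
      if d.contains (PySem.Str.lower prop) then d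
      else d.insert (PySem.Str.lower prop) (PySem.Str.isIn (PySem.Str.lower prop) pl)) d).get? k = some v →
      v = PySem.Str.isIn k pl := by
  induction props generalizing d with
  | nil => exact hd
  | cons x xs ih =>
    intro k v
    simp only [List.foldl_cons]
    split
    · exact ih d hd k v
    · refine ih _ ?_ k v
      intro k' v' h'
      rw [PySem.Dict.get?_insert] at h'
      by_cases hk : k' = PySem.Str.lower x
      · rw [if_pos hk] at h'
        subst hk
        exact (Option.some_inj.mp h').symm
      · rw [if_neg hk] at h'
        exact hd k' v' h'

-- B's cache contains the lowered key of every prop in the list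
theorem pvCache_mem (pl : String) (props : List String) (d : PySem.Dict String Bool) (p : String)
    (hp : p ∈ props ∨ d.contains (PySem.Str.lower p) = true) :
    (props.foldl (fun (d : PySem.Dict String Bool) prop =>
      if d.contains (PySem.Str.lower prop) then d
      else d.insert (PySem.Str.lower prop) (PySem.Str.isIn (PySem.Str.lower prop) pl)) d).contains (PySem.Str.lower p) = true := by
  induction props generalizing d with
  | nil => simpa using hp
  | cons x xs ih =>
    simp only [List.foldl_cons]
    rcases hp with hp | hp
    · rcases List.mem_cons.mp hp with rfl | hmem
      · split
        · exact ih d (Or.inr (by assumption))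
        · exact ih _ (Or.inr (by simp))
      · split
        · exact ih d (Or.inl hmem)
        · exact ih _ (Or.inl hmem)
    · split
      · exact ih d (Or.inr hp)
      · exact ih _ (Or.inr (by simp [PySem.Dict.contains_insert, hp]))

theorem pvCache_getD (pl : String) (props : List String) (p : String) (hp : p ∈ props) :
    (props.foldl (fun (d : PySem.Dict String Bool) prop =>
      if d.contains (PySem.Str.lower prop) then d
      else d.insert (PySem.Str.lower prop) (PySem.Str.isIn (PySem.Str.lower prop) pl)) PySem.Dict.empty).getD (PySem.Str.lower p) false
      = PySem.Str.isIn (PySem.Str.lower p) pl := by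
  set cache := props.foldl (fun (d : PySem.Dict String Bool) prop =>
      if d.contains (PySem.Str.lower prop) then d
      else d.insert (PySem.Str.lower prop) (PySem.Str.isIn (PySem.Str.lower prop) pl)) PySem.Dict.empty with hc
  have hmem : cache.contains (PySem.Str.lower p) = true :=
    pvCache_mem pl props PySem.Dict.empty p (Or.inl hp)
  rw [PySem.Dict.contains_eq_isSome_get?] at hmem
  obtain ⟨v, hv⟩ := Option.isSome_iff_exists.mp hmem
  have := pvCache_val pl props PySem.Dict.empty (by simp [PySem.Dict.get?_empty]) (PySem.Str.lower p) v hv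
  rw [PySem.Dict.getD_eq_get?_getD, hv, Option.getD_some, this]

-- ===== VERDICT (by name: the statement is the Claim_ definition above) =====
theorem check_prompt_contains_props_spec : Claim_equal_check_prompt_contains_props := by
  intro prompt props _
  unfold Spec_check_prompt_contains_props check_prompt_contains_props check_prompt_contains_props_alt
  by_cases h : prompt = ""
  · simp [h]
  · simp only [h, if_false]
    rw [pvA_loop]
    simp only [List.nil_append]
    refine Prod.ext ?_ ?_
    · exact (List.filter_congr (fun p hp => pvCache_getD (PySem.Str.lower prompt) props p hp)).symm
    · exact (List.filter_congr (fun p hp => by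
        rw [pvCache_getD (PySem.Str.lower prompt) props p hp])).symm
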